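-- pv_equiv track=rewrite | github.com/CrossLangNV/DGFISMA_term_extraction | dgconcepts/pipeline/terms_defined_bio_tagging.py | join_bpe
-- ===== SOURCE A (Python) =====
-- from typing import List, Tuple, Generator
--
-- def join_bpe( tokens:List[str], tags:List[str]  )->Tuple[ List[str], List[str] ]:
--
--     '''
--     Detokenize bert tokenized sentence and process bio_tags. Tokens with no bio tag (i.e. at position>seq_length) are ignored.
--     '''
--
--     new_tokens, new_tags = [], []
--
--     #tokens at position>seq_length are ignored
--     for token, tag in zip(tokens, tags ):
--         if token.startswith("##") and new_tokens: #check for new_tokens, to deal with case if sentence starts with ##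
--             new_tokens[-1] = new_tokens[-1] + token[2:]
--         else:
--             new_tags.append(tag)
--             new_tokens.append(token)
--     return new_tokens, new_tags
-- ===== SOURCE B (Python) =====
-- def join_bpe(tokens, tags):
--     pairs = list(zip(tokens, tags))
--     new_tokens, new_tags = [], []
--     i, n = 0, len(pairs)
--     while i < n:
--         tok, tag = pairs[i]
--         j = i + 1
--         while j < n and pairs[j][0].startswith("##"):
--             j += 1
--         new_tokens.append(tok + "".join(pairs[k][0][2:] for k in range(i + 1, j)))
--         new_tags.append(tag)
--         i = j
--     return new_tokens, new_tags
-- ===== Notes on version B (the rewrite author's own statement) =====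
-- stated objective: alternative
-- what changed: B replaces A's single pass that mutates the last accumulated token on every '##' continuation with a two-level span scan: it finds each group head, scans forward over its '##' continuations, and emits the merged token and its tag once per group.
import Mathlib
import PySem

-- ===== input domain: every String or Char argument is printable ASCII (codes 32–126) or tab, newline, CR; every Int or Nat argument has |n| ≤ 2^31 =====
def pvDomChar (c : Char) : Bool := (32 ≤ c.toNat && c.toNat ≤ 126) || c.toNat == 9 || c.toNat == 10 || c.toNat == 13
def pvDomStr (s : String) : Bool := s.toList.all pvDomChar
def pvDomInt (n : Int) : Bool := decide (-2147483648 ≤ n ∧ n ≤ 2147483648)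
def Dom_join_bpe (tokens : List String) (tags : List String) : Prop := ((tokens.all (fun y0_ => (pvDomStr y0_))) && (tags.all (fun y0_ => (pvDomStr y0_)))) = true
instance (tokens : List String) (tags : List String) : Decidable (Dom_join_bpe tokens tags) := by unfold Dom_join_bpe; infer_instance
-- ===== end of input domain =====

-- B rebuilds the detokenization by a two-level span scan (group head + its '##' continuations) instead of A's
-- single pass that mutates the last accumulated token; same return value, objective: alternative decomposition.

-- ===== PORT A =====
-- the loop body: if token.startswith("##") and new_tokens: merge into new_tokens[-1]; else append token and tag
def joinStepA (acc : List (List Char) × List (List Char)) (p : List Char × List Char) :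
    List (List Char) × List (List Char) :=
  if PySem.Chars.startswith p.1 ['#', '#'] && !acc.1.isEmpty then
    (acc.1.dropLast ++ [acc.1.getLastD [] ++ PySem.Chars.slice p.1 (some 2) none], acc.2)
  else
    (acc.1 ++ [p.1], acc.2 ++ [p.2])

def join_bpe (tokens : List String) (tags : List String) : List String × List String :=
  let pairs := List.zip (tokens.map String.toList) (tags.map String.toList)
  let r := pairs.foldl joinStepA ([], [])
  (r.1.map String.ofList, r.2.map String.ofList)

-- ===== PORT B =====
def joinContB (p : List Char × List Char) : Bool := PySem.Chars.startswith p.1 ['#', '#']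

-- the outer while loop: each step consumes one group head plus its span of '##' continuations
def joinGoB : List (List Char × List Char) → List (List Char) × List (List Char)
  | [] => ([], [])
  | p :: rest =>
      let cont := rest.takeWhile joinContB
      let r := joinGoB (rest.dropWhile joinContB)
      ((p.1 ++ (cont.map (fun q => PySem.Chars.slice q.1 (some 2) none)).flatten) :: r.1,
       p.2 :: r.2)
  termination_by l => l.length
  decreasing_by
    simp only [List.length_cons]
    exact Nat.lt_succ_of_le (List.length_dropWhile_le _ _)

def join_bpe_alt (tokens : List String) (tags : List String) : List String × List String :=
  let pairs := List.zip (tokens.map String.toList) (tags.map String.toList)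
  let r := joinGoB pairs
  (r.1.map String.ofList, r.2.map String.ofList)

-- ===== PRECONDITION & SPEC =====
def Spec_join_bpe (tokens : List String) (tags : List String) (out : List String × List String) : Prop := out = join_bpe_alt tokens tags
instance (tokens : List String) (tags : List String) (out : List String × List String) : Decidable (Spec_join_bpe tokens tags out) := by unfold Spec_join_bpe; infer_instance

-- ===== CLAIM (what is proved, stated in full; the proofs are below) =====
def Claim_equal_join_bpe : Prop := ∀ (tokens : List String) (tags : List String), Dom_join_bpe tokens tags → Spec_join_bpe tokens tags (join_bpe tokens tags)

-- ===== LEMMAS AND PROOFS =====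

theorem joinStepA_cont (ts : List (List Char)) (last : List Char) (gs : List (List Char))
    (p : List Char × List Char) (hp : joinContB p = true) :
    joinStepA (ts ++ [last], gs) p = (ts ++ [last ++ PySem.Chars.slice p.1 (some 2) none], gs) := by
  simp [joinStepA, joinContB] at hp ⊢
  simp [hp]

theorem joinStepA_head (ts : List (List Char)) (last : List Char) (gs : List (List Char))
    (p : List Char × List Char) (hp : joinContB p = false) :
    joinStepA (ts ++ [last], gs) p = ((ts ++ [last]) ++ [p.1], gs ++ [p.2]) := by
  simp [joinStepA, joinContB] at hp ⊢
  simp [hp]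

theorem fold_eq_go (pairs : List (List Char × List Char)) :
    ∀ (ts : List (List Char)) (last : List Char) (gs : List (List Char)),
    List.foldl joinStepA (ts ++ [last], gs) pairs =
      (ts ++ (last ++ ((pairs.takeWhile joinContB).map
          (fun q => PySem.Chars.slice q.1 (some 2) none)).flatten)
        :: (joinGoB (pairs.dropWhile joinContB)).1,
       gs ++ (joinGoB (pairs.dropWhile joinContB)).2) := by
  induction pairs with
  | nil => intro ts last gs; simp [joinGoB]
  | cons p rest ih =>
    intro ts last gs
    by_cases hp : joinContB p = true
    · rw [List.foldl_cons, joinStepA_cont ts last gs p hp, ih]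
      simp [hp, List.append_assoc]
    · rw [Bool.not_eq_true] at hp
      rw [List.foldl_cons, joinStepA_head ts last gs p hp, ih]
      rw [List.takeWhile_cons_of_neg (by simp [hp]), List.dropWhile_cons_of_neg (by simp [hp])]
      rw [joinGoB]
      simp

theorem fold_eq_go_top (pairs : List (List Char × List Char)) :
    List.foldl joinStepA ([], []) pairs = joinGoB pairs := by
  cases pairs with
  | nil => simp [joinGoB]
  | cons p rest =>
    have h1 : joinStepA ([], []) p = (([] : List (List Char)) ++ [p.1], ([] : List (List Char)) ++ [p.2]) := by
      simp [joinStepA]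
    rw [List.foldl_cons, h1, fold_eq_go rest [] p.1 ([] ++ [p.2]), joinGoB]
    simp

-- ===== VERDICT (by name: the statement is the Claim_ definition above) =====
theorem join_bpe_spec : Claim_equal_join_bpe := by
  intro tokens tags _
  unfold Spec_join_bpe join_bpe join_bpe_alt
  simp only [fold_eq_go_top]
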